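-- pv_equiv track=rewrite | github.com/JarretNachtigal/python-sandbox | minion_game.py | get_consonant_substrings
-- ===== SOURCE A (Python) =====
-- def get_consonant_substrings(string):
--     consonants = ['B', 'C', 'D', 'F', 'G', 'H', 'J', 'K', 'L', 'M',
--                   'N', 'P', 'Q', 'R', 'S', 'T', 'V', 'W', 'X', 'Y', 'Z']
--     substrings = []
--     length = len(string)
--     for letter in consonants:  # loop through vowels to check if they exist
--         if string.count(letter) > 0:  # if they exist
--             substrings.append(letter)  # add vowel to substrings
--             i = string.index(letter) + 1  # set i to index of vowel + 1
--             while i < length:  # add remaining substrings after the vowel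
--                 # add previous substring + next letter
--                 substrings.append(substrings[len(substrings) - 1] + string[i])
--                 i += 1
--
--     return substrings
-- ===== SOURCE B (Python) =====
-- def get_consonant_substrings(string):
--     consonants = ['B', 'C', 'D', 'F', 'G', 'H', 'J', 'K', 'L', 'M',
--                   'N', 'P', 'Q', 'R', 'S', 'T', 'V', 'W', 'X', 'Y', 'Z']
--     first = {}
--     for i, ch in enumerate(string):
--         if ch not in first:
--             first[ch] = i
--     substrings = []
--     n = len(string)
--     for letter in consonants:
--         if letter in first:
--             idx = first[letter]
--             for end in range(idx + 1, n + 1):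
--                 substrings.append(string[idx:end])
--     return substrings
-- ===== Notes on version B (the rewrite author's own statement) =====
-- stated objective: alternative
-- what changed: B builds a first-occurrence index dict in one pass over the string and emits each substring by direct slicing string[idx:end], instead of A's per-consonant count/index scans and growing each substring by concatenating onto the previous accumulator entry.
import Mathlib
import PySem

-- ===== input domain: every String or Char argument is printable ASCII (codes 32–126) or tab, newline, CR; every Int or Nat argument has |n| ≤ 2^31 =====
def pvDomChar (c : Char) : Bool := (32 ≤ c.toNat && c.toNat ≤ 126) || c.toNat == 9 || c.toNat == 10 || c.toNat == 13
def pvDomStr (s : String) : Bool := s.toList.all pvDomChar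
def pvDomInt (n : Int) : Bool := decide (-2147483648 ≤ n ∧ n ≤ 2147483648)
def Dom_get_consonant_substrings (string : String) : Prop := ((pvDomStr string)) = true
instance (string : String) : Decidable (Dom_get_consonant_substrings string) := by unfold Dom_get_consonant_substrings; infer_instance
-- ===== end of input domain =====

-- B replaces A's 21 repeated count/index scans with one first-index dict pass and
-- replaces the accumulator-grown substrings with direct slices (objective: alternative).


-- ===== PORT A =====
-- the consonant table both Pythons carry literally
def pvConsonants : List Char :=
  ['B','C','D','F','G','H','J','K','L','M','N','P','Q','R','S','T','V','W','X','Y','Z']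

-- A's inner `while i < length` loop: append previous substring + string[i]
def pvAWhile (l : List Char) (i : Nat) (acc : List (List Char)) : List (List Char) :=
  if h : i < l.length then
    pvAWhile l (i + 1) (acc ++ [acc.getD (acc.length - 1) [] ++ [l[i]]])
  else acc
termination_by l.length - i

def get_consonant_substrings (string : String) : List String :=
  let l := string.toList
  let substrings := pvConsonants.foldl (fun subs letter =>
    if PySem.Chars.count l [letter] > 0 then
      -- string.index(letter): the count > 0 guard makes find nonnegative, exact to str.index
      pvAWhile l ((PySem.Chars.find l [letter]).toNat + 1) (subs ++ [[letter]])
    else subs) []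
  substrings.map String.mk

-- ===== PORT B =====
-- one pass over enumerate(string), keeping only the first index of each character
def pvFirstIndex (l : List Char) : PySem.Dict Char Int :=
  (PySem.List.enumerate l).foldl
    (fun d p => if (d.get? p.2).isSome then d else d.insert p.2 p.1) ⟨[]⟩

def get_consonant_substrings_alt (string : String) : List String :=
  let l := string.toList
  let first := pvFirstIndex l
  let n := l.length
  let substrings := pvConsonants.foldl (fun subs letter =>
    match first.get? letter with
    | some idx => subs ++ (PySem.List.pyRange (idx + 1) ((n : Int) + 1)).map
        (fun e => PySem.List.slice l (some idx) (some e))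
    | none => subs) []
  substrings.map String.mk

-- ===== PRECONDITION & SPEC =====
def Spec_get_consonant_substrings (string : String) (out : List String) : Prop := out = get_consonant_substrings_alt string
instance (string : String) (out : List String) : Decidable (Spec_get_consonant_substrings string out) := by unfold Spec_get_consonant_substrings; infer_instance

-- ===== CLAIM (what is proved, stated in full; the proofs are below) =====
def Claim_equal_get_consonant_substrings : Prop := ∀ (string : String), Dom_get_consonant_substrings string → Spec_get_consonant_substrings string (get_consonant_substrings string)

-- ===== LEMMAS AND PROOFS =====

-- substrings[len(substrings)-1] on a just-extended list is the element just appended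
theorem pvGetD_concat_last {α : Type} (acc : List α) (t : α) (d : α) :
    (acc ++ [t]).getD ((acc ++ [t]).length - 1) d = t := by
  simp [List.getD_eq_getElem?_getD, List.getElem?_concat_length, List.length_append]

theorem pvCountGo_single (c : Char) :
    ∀ (l : List Char) (fuel acc : Nat), l.length ≤ fuel →
      PySem.Chars.count.go [c] fuel l acc = acc + l.count c := by
  intro l
  induction l with
  | nil => intro fuel acc _; cases fuel <;> simp [PySem.Chars.count.go]
  | cons h t ih =>
      intro fuel acc hf
      cases fuel with
      | zero => simp at hf
      | succ m =>
          have hm : t.length ≤ m := by simpa using hf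
          by_cases hc : c = h
          · subst hc
            rw [show PySem.Chars.count.go [c] (m + 1) (c :: t) acc =
                PySem.Chars.count.go [c] m t (acc + 1) from by
              simp [PySem.Chars.count.go, List.isPrefixOf]]
            rw [ih m (acc + 1) hm, List.count_cons_self]
            omega
          · have hpre : ([c].isPrefixOf (h :: t)) = false := by
              simp [List.isPrefixOf, hc]
            simp only [PySem.Chars.count.go, hpre, Bool.false_eq_true, if_false]
            rw [ih m acc hm]
            simp [List.count_cons, Ne.symm hc]

theorem pvCount_single (l : List Char) (c : Char) :
    PySem.Chars.count l [c] = l.count c := by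
  simp [PySem.Chars.count, pvCountGo_single c l l.length 0 le_rfl]

theorem pvFindGo_single (c : Char) :
    ∀ (l : List Char) (k : Nat),
      PySem.Chars.find.go [c] l k = if c ∈ l then ((k + l.idxOf c : Nat) : Int) else -1 := by
  intro l
  induction l with
  | nil => intro k; simp [PySem.Chars.find.go]
  | cons h t ih =>
      intro k
      by_cases hc : c = h
      · subst hc
        simp [PySem.Chars.find.go, List.isPrefixOf]
      · have hpre : ([c].isPrefixOf (h :: t)) = false := by
          simp [List.isPrefixOf, hc]
        have hbeq : (h == c) = false := by
          simp [Ne.symm hc]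
        by_cases hm : c ∈ t
        · simp [PySem.Chars.find.go, hpre, ih (k + 1), hm, hc, List.idxOf_cons, hbeq]
          push_cast; ring
        · simp [PySem.Chars.find.go, hpre, ih (k + 1), hm, hc]

theorem pvFind_single {l : List Char} {c : Char} (hmem : c ∈ l) :
    PySem.Chars.find l [c] = (l.idxOf c : Int) := by
  simp [PySem.Chars.find, pvFindGo_single c l 0, hmem]

-- the first-index dict: lookup = first occurrence index, offset by the enumerate start
theorem pvFirstIndex_go (c : Char) :
    ∀ (l : List Char) (d : PySem.Dict Char Int) (k : Int),
      ((PySem.List.enumerate l k).foldl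
        (fun d p => if (d.get? p.2).isSome then d else d.insert p.2 p.1) d).get? c =
      (d.get? c).or (if c ∈ l then some (k + (l.idxOf c : Int)) else none) := by
  intro l
  induction l with
  | nil => intro d k; simp [PySem.List.enumerate]
  | cons h t ih =>
      intro d k
      simp only [PySem.List.enumerate, List.foldl_cons]
      by_cases hc : c = h
      · subst hc
        cases hd : d.get? c with
        | some v => simp [hd, ih]
        | none =>
            simp only [hd, Option.isSome_none, Bool.false_eq_true, if_false]
            rw [ih]
            simp [PySem.Dict.get?_insert_self]
      · have hne : c ≠ h := hc
        have hbeq : (h == c) = false := by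
          simp [Ne.symm hc]
        have hstep : ∀ (d' : PySem.Dict Char Int),
            ((if (d'.get? h).isSome then d' else d'.insert h k).get? c) = d'.get? c := by
          intro d'; split
          · rfl
          · exact PySem.Dict.get?_insert_of_ne d' k hne
        rw [ih]
        cases hd : (if (d.get? h).isSome then d else d.insert h k).get? c with
        | some v => rw [hstep] at hd; simp [hd]
        | none =>
            rw [hstep] at hd
            simp only [hd, Option.or, List.mem_cons, List.idxOf_cons, hbeq]
            by_cases hm : c ∈ t
            · simp [hm, hne]; push_cast; ring
            · simp [hm, hne]

theorem pvFirstIndex_get? (l : List Char) (c : Char) :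
    (pvFirstIndex l).get? c =
      (if c ∈ l then some ((l.idxOf c : Nat) : Int) else none) := by
  have h0 : (⟨[]⟩ : PySem.Dict Char Int).get? c = none := by
    simp [PySem.Dict.get?]
  simpa [pvFirstIndex, h0] using pvFirstIndex_go c l ⟨[]⟩ 0

-- pyRange over a nat interval as a mapped List.range
theorem pvPyRange_nat (a : Nat) :
    ∀ (d : Nat), PySem.List.pyRange (a : Int) ((a : Int) + (d : Int)) =
      (List.range d).map (fun k => ((a + k : Nat) : Int)) := by
  intro d
  induction d with
  | zero =>
      have : ¬ ((a : Int) < (a : Int) + 0) := by omega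
      simp [PySem.List.pyRange]
  | succ m ih =>
      have hle : (a : Int) ≤ (a : Int) + (m : Int) := by omega
      have : ((a : Int) + ((m : Nat).succ : Int)) = ((a : Int) + (m : Int)) + 1 := by
        push_cast; ring
      rw [this, PySem.List.pyRange_one_succ_right hle, ih, List.range_succ]
      simp

-- A's while loop appends the successively extended suffix copies of its last element
theorem pvAWhile_spec (l : List Char) :
    ∀ (i : Nat) (acc : List (List Char)) (t : List Char), i ≤ l.length →
      pvAWhile l i (acc ++ [t]) =
        acc ++ (List.range (l.length - i + 1)).map (fun k => t ++ (l.drop i).take k) := by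
  intro i
  induction hn : l.length - i generalizing i with
  | zero =>
      intro acc t hi
      have hi' : ¬ i < l.length := by omega
      rw [pvAWhile, dif_neg hi']
      simp [List.range_succ]
  | succ m ih =>
      intro acc t hi
      have hlt : i < l.length := by omega
      rw [pvAWhile, dif_pos hlt, pvGetD_concat_last]
      have hrec := ih (i + 1) (by omega) (acc ++ [t]) (t ++ [l[i]]) (by omega)
      rw [hrec]
      have hdrop : l.drop i = l[i] :: l.drop (i + 1) := List.drop_eq_getElem_cons hlt
      conv_rhs => rw [List.range_succ_eq_map, List.map_cons, List.map_map]
      have hcomp : ((fun k => t ++ List.take k (List.drop i l)) ∘ Nat.succ) =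
          fun k => t ++ [l[i]] ++ List.take k (List.drop (i + 1) l) := by
        funext k
        show t ++ List.take (Nat.succ k) (List.drop i l) =
          t ++ [l[i]] ++ List.take k (List.drop (i + 1) l)
        rw [hdrop, List.take_succ_cons]
        simp
      rw [hcomp]
      simp

-- the per-letter step functions of the two folds agree
theorem pvStep_eq (l : List Char) (subs : List (List Char)) (c : Char) :
    (if PySem.Chars.count l [c] > 0 then
      pvAWhile l ((PySem.Chars.find l [c]).toNat + 1) (subs ++ [[c]])
     else subs) =
    (match (pvFirstIndex l).get? c with
     | some idx => subs ++ (PySem.List.pyRange (idx + 1) ((l.length : Int) + 1)).map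
        (fun e => PySem.List.slice l (some idx) (some e))
     | none => subs) := by
  cases hg : (pvFirstIndex l).get? c with
  | none =>
      have hmem : c ∉ l := by
        by_contra hmem
        rw [pvFirstIndex_get? l c, if_pos hmem] at hg
        simp at hg
      have hcount : ¬ PySem.Chars.count l [c] > 0 := by
        rw [pvCount_single]
        simp [List.count_eq_zero_of_not_mem hmem]
      rw [if_neg hcount]
  | some idx =>
      have hmem : c ∈ l := by
        by_contra hmem
        rw [pvFirstIndex_get? l c, if_neg hmem] at hg
        simp at hg
      have hidxv : idx = ((l.idxOf c : Nat) : Int) := by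
        rw [pvFirstIndex_get? l c, if_pos hmem] at hg
        exact (Option.some.inj hg).symm
      subst hidxv
      show _ = subs ++ (PySem.List.pyRange (((l.idxOf c : Nat) : Int) + 1)
          ((l.length : Int) + 1)).map
        (fun e => PySem.List.slice l (some ((l.idxOf c : Nat) : Int)) (some e))
      have hcount : PySem.Chars.count l [c] > 0 := by
        rw [pvCount_single]; exact List.count_pos_iff.mpr hmem
      have hidx : l.idxOf c < l.length := List.idxOf_lt_length_of_mem hmem
      rw [if_pos hcount, pvFind_single hmem]
      have htoNat : ((l.idxOf c : Int)).toNat = l.idxOf c := by simp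
      rw [htoNat, pvAWhile_spec l (l.idxOf c + 1) subs [c] (by omega)]
      have hcast : ((l.idxOf c : Int) + 1) = ((l.idxOf c + 1 : Nat) : Int) := by push_cast; ring
      have hcast2 : ((l.length : Int) + 1) =
          ((l.idxOf c + 1 : Nat) : Int) + ((l.length - l.idxOf c : Nat) : Int) := by
        push_cast [Nat.cast_sub (le_of_lt hidx)]; ring
      rw [hcast, hcast2, pvPyRange_nat]
      rw [List.map_map]
      have hlen : l.length - (l.idxOf c + 1) + 1 = l.length - l.idxOf c := by omega
      rw [hlen]
      congr 1
      apply List.map_congr_left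
      intro k _
      have hslice : PySem.List.slice l (some ((l.idxOf c : Nat) : Int))
          (some ((l.idxOf c + 1 + k : Nat) : Int)) =
          List.take (l.idxOf c + 1 + k - l.idxOf c) (List.drop (l.idxOf c) l) :=
        PySem.List.slice_natCast l (l.idxOf c) (l.idxOf c + 1 + k)
      simp only [Function.comp]
      rw [hslice]
      have hk : l.idxOf c + 1 + k - l.idxOf c = k + 1 := by omega
      rw [hk]
      have hdrop : l.drop (l.idxOf c) = l[l.idxOf c] :: l.drop (l.idxOf c + 1) :=
        List.drop_eq_getElem_cons hidx
      rw [hdrop, List.getElem_idxOf hidx]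
      simp

-- ===== VERDICT (by name: the statement is the Claim_ definition above) =====
theorem get_consonant_substrings_spec : Claim_equal_get_consonant_substrings := by
  intro s _
  unfold Spec_get_consonant_substrings get_consonant_substrings get_consonant_substrings_alt
  have := PySem.List.foldl_congr_mem pvConsonants
    (fun subs letter =>
      if PySem.Chars.count s.toList [letter] > 0 then
        pvAWhile s.toList ((PySem.Chars.find s.toList [letter]).toNat + 1) (subs ++ [[letter]])
      else subs)
    (fun subs letter =>
      match (pvFirstIndex s.toList).get? letter with
      | some idx => subs ++ (PySem.List.pyRange (idx + 1) ((s.toList.length : Int) + 1)).map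
          (fun e => PySem.List.slice s.toList (some idx) (some e))
      | none => subs)
    []
    (fun acc x _ => pvStep_eq s.toList acc x)
  simp only [this]
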